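-- pv_equiv track=rewrite | github.com/pill/recipes-etl | src/recipes/utils/local_parser.py | _extract_cuisine
-- ===== SOURCE A (Python) =====
-- from typing import List, Dict, Any, Optional
--
-- def _extract_cuisine(text: str, title: str, ingredients: List) -> Optional[str]:
--     """Extract cuisine type from text, title, and ingredients."""
--     text_lower = text.lower()
--     title_lower = title.lower()
--     combined = f"{title_lower} {text_lower}"
--
--     # Cuisine keywords mapping
--     cuisine_keywords = {
--         'Italian': ['italian', 'pasta', 'risotto', 'parmigiano', 'parmesan', 'mozzarella',
--                    'basil', 'marinara', 'carbonara', 'lasagna', 'tiramisu', 'bruschetta'],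
--         'Mexican': ['mexican', 'taco', 'burrito', 'enchilada', 'salsa', 'guacamole',
--                    'tortilla', 'cilantro', 'jalapeño', 'chipotle', 'fajita', 'quesadilla'],
--         'Chinese': ['chinese', 'stir fry', 'wok', 'soy sauce', 'ginger', 'bok choy',
--                    'szechuan', 'dim sum', 'dumpling', 'lo mein', 'chow mein'],
--         'Japanese': ['japanese', 'sushi', 'ramen', 'miso', 'teriyaki', 'tempura',
--                     'wasabi', 'udon', 'soba', 'sake', 'mirin', 'nori'],
--         'Thai': ['thai', 'pad thai', 'curry paste', 'lemongrass', 'fish sauce',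
--                 'coconut milk', 'basil thai', 'galangal', 'kaffir lime'],
--         'Indian': ['indian', 'curry', 'naan', 'tandoori', 'masala', 'tikka',
--                   'cumin', 'turmeric', 'garam masala', 'cardamom', 'biryani'],
--         'French': ['french', 'béarnaise', 'hollandaise', 'croissant', 'baguette',
--                   'coq au vin', 'ratatouille', 'crème', 'bourguignon', 'soufflé'],
--         'Greek': ['greek', 'feta', 'tzatziki', 'gyro', 'moussaka', 'baklava',
--                  'oregano', 'kalamata', 'spanakopita', 'souvlaki'],
--         'Korean': ['korean', 'kimchi', 'bibimbap', 'bulgogi', 'gochujang',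
--                   'ssamjang', 'korean bbq', 'banchan', 'gochugaru', 'soju'],
--         'Vietnamese': ['vietnamese', 'pho', 'banh mi', 'spring roll', 'nuoc mam'],
--         'Spanish': ['spanish', 'paella', 'tapas', 'chorizo', 'gazpacho', 'sangria'],
--         'American': ['bbq', 'barbecue', 'burger', 'hotdog', 'mac and cheese',
--                     'southern', 'cajun', 'creole', 'fried chicken'],
--         'Middle Eastern': ['middle eastern', 'hummus', 'falafel', 'tahini', 'shawarma',
--                          'pita', 'chickpea', 'couscous', 'kebab', 'baba ganoush'],
--         'Mediterranean': ['mediterranean', 'olive oil', 'feta', 'olives', 'lemon'],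
--     }
--
--     # Priority 1: Check if cuisine name itself is in the title (strongest signal)
--     # e.g., "Korean Beef Bowl" -> Korean cuisine
--     for cuisine, keywords in cuisine_keywords.items():
--         cuisine_name = cuisine.lower()
--         if cuisine_name in title_lower:
--             return cuisine
--
--     # Priority 2: Check for multiple keyword matches or single keyword in title
--     for cuisine, keywords in cuisine_keywords.items():
--         matches = sum(1 for keyword in keywords if keyword in combined)
--         if matches >= 2:  # Require at least 2 keyword matches
--             return cuisine
--         elif matches == 1 and any(keyword in title_lower for keyword in keywords):
--             # Single match in title is enough
--             return cuisine
--
--     # TODO: Future enhancement - Ingredient-based cuisine detection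
--     # Analyze ingredient combinations to infer cuisine:
--     # - Korean: gochujang + soy sauce + sesame
--     # - Italian: olive oil + tomato + basil
--     # - Thai: fish sauce + lime + coconut milk
--     # - etc.
--
--     return None
-- ===== SOURCE B (Python) =====
-- from typing import List, Optional
--
-- # Compact cuisine table: (cuisine, comma-separated keywords), in the original priority order.
-- _CUISINE_TABLE = [
--     ('Italian', 'italian,pasta,risotto,parmigiano,parmesan,mozzarella,basil,marinara,carbonara,lasagna,tiramisu,bruschetta'),
--     ('Mexican', 'mexican,taco,burrito,enchilada,salsa,guacamole,tortilla,cilantro,jalape\u00f1o,chipotle,fajita,quesadilla'),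
--     ('Chinese', 'chinese,stir fry,wok,soy sauce,ginger,bok choy,szechuan,dim sum,dumpling,lo mein,chow mein'),
--     ('Japanese', 'japanese,sushi,ramen,miso,teriyaki,tempura,wasabi,udon,soba,sake,mirin,nori'),
--     ('Thai', 'thai,pad thai,curry paste,lemongrass,fish sauce,coconut milk,basil thai,galangal,kaffir lime'),
--     ('Indian', 'indian,curry,naan,tandoori,masala,tikka,cumin,turmeric,garam masala,cardamom,biryani'),
--     ('French', 'french,b\u00e9arnaise,hollandaise,croissant,baguette,coq au vin,ratatouille,cr\u00e8me,bourguignon,souffl\u00e9'),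
--     ('Greek', 'greek,feta,tzatziki,gyro,moussaka,baklava,oregano,kalamata,spanakopita,souvlaki'),
--     ('Korean', 'korean,kimchi,bibimbap,bulgogi,gochujang,ssamjang,korean bbq,banchan,gochugaru,soju'),
--     ('Vietnamese', 'vietnamese,pho,banh mi,spring roll,nuoc mam'),
--     ('Spanish', 'spanish,paella,tapas,chorizo,gazpacho,sangria'),
--     ('American', 'bbq,barbecue,burger,hotdog,mac and cheese,southern,cajun,creole,fried chicken'),
--     ('Middle Eastern', 'middle eastern,hummus,falafel,tahini,shawarma,pita,chickpea,couscous,kebab,baba ganoush'),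
--     ('Mediterranean', 'mediterranean,olive oil,feta,olives,lemon'),
-- ]
--
--
-- def _extract_cuisine(text: str, title: str, ingredients: List) -> Optional[str]:
--     """Extract cuisine type: one score-then-select pass over a compact keyword table."""
--     title_lower = title.lower()
--     combined = title_lower + " " + text.lower()
--
--     # Score each cuisine with a level (2 = name in title, 1 = keyword evidence, 0 = none)
--     # and keep the first cuisine that strictly beats the best level seen so far.
--     best = None
--     best_level = 0
--     for cuisine, kwcsv in _CUISINE_TABLE:
--         keywords = kwcsv.split(',')
--         if cuisine.lower() in title_lower:
--             level = 2
--         else: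
--             matches = sum(kw in combined for kw in keywords)
--             if matches >= 2 or (matches == 1 and any(kw in title_lower for kw in keywords)):
--                 level = 1
--             else:
--                 level = 0
--         if level > best_level:
--             best = cuisine
--             best_level = level
--     return best
-- ===== Notes on version B (the rewrite author's own statement) =====
-- stated objective: alternative
-- what changed: Replaces A's two sequential short-circuit scans of an inline dict (priority-1 pass, then priority-2 pass) with a single score-then-select fold over a compact (cuisine, csv-keywords) table parsed on the fly: each cuisine gets a level 2/1/0 and the first strict improvement wins.
import Mathlib
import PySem

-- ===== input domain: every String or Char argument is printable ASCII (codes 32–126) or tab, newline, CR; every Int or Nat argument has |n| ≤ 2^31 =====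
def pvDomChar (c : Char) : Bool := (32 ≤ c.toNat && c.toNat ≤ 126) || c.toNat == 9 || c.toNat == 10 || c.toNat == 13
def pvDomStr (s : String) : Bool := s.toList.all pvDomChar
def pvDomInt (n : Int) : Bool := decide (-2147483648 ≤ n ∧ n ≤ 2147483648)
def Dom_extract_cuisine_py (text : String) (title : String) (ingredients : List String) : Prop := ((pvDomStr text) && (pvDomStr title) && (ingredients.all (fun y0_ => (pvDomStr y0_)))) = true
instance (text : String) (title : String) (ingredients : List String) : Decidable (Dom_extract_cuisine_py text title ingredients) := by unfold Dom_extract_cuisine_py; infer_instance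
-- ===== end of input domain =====

-- B replaces A's two sequential short-circuit scans of an inline dict with one score-then-select
-- fold over a compact (cuisine, csv-keywords) table parsed on the fly (objective: alternative, same cost).

-- ===== PORT A =====
-- A's cuisine_keywords dict, verbatim
def cuisineKeywords : List (String × List String) := [
  ("Italian", ["italian", "pasta", "risotto", "parmigiano", "parmesan", "mozzarella", "basil", "marinara", "carbonara", "lasagna", "tiramisu", "bruschetta"]),
  ("Mexican", ["mexican", "taco", "burrito", "enchilada", "salsa", "guacamole", "tortilla", "cilantro", "jalapeño", "chipotle", "fajita", "quesadilla"]),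
  ("Chinese", ["chinese", "stir fry", "wok", "soy sauce", "ginger", "bok choy", "szechuan", "dim sum", "dumpling", "lo mein", "chow mein"]),
  ("Japanese", ["japanese", "sushi", "ramen", "miso", "teriyaki", "tempura", "wasabi", "udon", "soba", "sake", "mirin", "nori"]),
  ("Thai", ["thai", "pad thai", "curry paste", "lemongrass", "fish sauce", "coconut milk", "basil thai", "galangal", "kaffir lime"]),
  ("Indian", ["indian", "curry", "naan", "tandoori", "masala", "tikka", "cumin", "turmeric", "garam masala", "cardamom", "biryani"]),
  ("French", ["french", "béarnaise", "hollandaise", "croissant", "baguette", "coq au vin", "ratatouille", "crème", "bourguignon", "soufflé"]),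
  ("Greek", ["greek", "feta", "tzatziki", "gyro", "moussaka", "baklava", "oregano", "kalamata", "spanakopita", "souvlaki"]),
  ("Korean", ["korean", "kimchi", "bibimbap", "bulgogi", "gochujang", "ssamjang", "korean bbq", "banchan", "gochugaru", "soju"]),
  ("Vietnamese", ["vietnamese", "pho", "banh mi", "spring roll", "nuoc mam"]),
  ("Spanish", ["spanish", "paella", "tapas", "chorizo", "gazpacho", "sangria"]),
  ("American", ["bbq", "barbecue", "burger", "hotdog", "mac and cheese", "southern", "cajun", "creole", "fried chicken"]),
  ("Middle Eastern", ["middle eastern", "hummus", "falafel", "tahini", "shawarma", "pita", "chickpea", "couscous", "kebab", "baba ganoush"]),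
  ("Mediterranean", ["mediterranean", "olive oil", "feta", "olives", "lemon"])]

-- Priority-1 loop: first cuisine whose lowercased name occurs in the title
def ecLoop1 (titleL : List Char) : List (String × List String) → Option String
  | [] => none
  | (c, _) :: rest =>
    if PySem.Chars.isIn (PySem.Chars.lower c.toList) titleL then some c
    else ecLoop1 titleL rest

-- Priority-2 loop: ≥2 keyword matches in combined, or exactly 1 with a keyword in the title
def ecLoop2 (titleL combined : List Char) : List (String × List String) → Option String
  | [] => none
  | (c, kws) :: rest =>
    let mcount := kws.countP (fun kw => PySem.Chars.isIn kw.toList combined)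
    if mcount ≥ 2 then some c
    else if mcount == 1 && kws.any (fun kw => PySem.Chars.isIn kw.toList titleL) then some c
    else ecLoop2 titleL combined rest

def extract_cuisine_py (text : String) (title : String) (ingredients : List String) : Option String :=
  let textL := PySem.Chars.lower text.toList
  let titleL := PySem.Chars.lower title.toList
  let combined := titleL ++ ' ' :: textL
  match ecLoop1 titleL cuisineKeywords with
  | some c => some c
  | none => ecLoop2 titleL combined cuisineKeywords

-- ===== PORT B =====
-- B's _CUISINE_TABLE: (cuisine, comma-separated keywords), original priority order
def cuisineTable : List (String × String) := [
  ("Italian", "italian,pasta,risotto,parmigiano,parmesan,mozzarella,basil,marinara,carbonara,lasagna,tiramisu,bruschetta"),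
  ("Mexican", "mexican,taco,burrito,enchilada,salsa,guacamole,tortilla,cilantro,jalapeño,chipotle,fajita,quesadilla"),
  ("Chinese", "chinese,stir fry,wok,soy sauce,ginger,bok choy,szechuan,dim sum,dumpling,lo mein,chow mein"),
  ("Japanese", "japanese,sushi,ramen,miso,teriyaki,tempura,wasabi,udon,soba,sake,mirin,nori"),
  ("Thai", "thai,pad thai,curry paste,lemongrass,fish sauce,coconut milk,basil thai,galangal,kaffir lime"),
  ("Indian", "indian,curry,naan,tandoori,masala,tikka,cumin,turmeric,garam masala,cardamom,biryani"),
  ("French", "french,béarnaise,hollandaise,croissant,baguette,coq au vin,ratatouille,crème,bourguignon,soufflé"),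
  ("Greek", "greek,feta,tzatziki,gyro,moussaka,baklava,oregano,kalamata,spanakopita,souvlaki"),
  ("Korean", "korean,kimchi,bibimbap,bulgogi,gochujang,ssamjang,korean bbq,banchan,gochugaru,soju"),
  ("Vietnamese", "vietnamese,pho,banh mi,spring roll,nuoc mam"),
  ("Spanish", "spanish,paella,tapas,chorizo,gazpacho,sangria"),
  ("American", "bbq,barbecue,burger,hotdog,mac and cheese,southern,cajun,creole,fried chicken"),
  ("Middle Eastern", "middle eastern,hummus,falafel,tahini,shawarma,pita,chickpea,couscous,kebab,baba ganoush"),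
  ("Mediterranean", "mediterranean,olive oil,feta,olives,lemon")]

-- One loop body of B: split the csv, score the cuisine (2 / 1 / 0), keep it iff it strictly
-- improves the best level seen so far
def ecStepB (titleL combined : List Char) (acc : Option String × Nat) (p : String × String) : Option String × Nat :=
  let keywords := (PySem.Chars.splitOn p.2.toList [',']).map String.ofList
  let level :=
    if PySem.Chars.isIn (PySem.Chars.lower p.1.toList) titleL then 2
    else
      let mcount := keywords.countP (fun kw => PySem.Chars.isIn kw.toList combined)
      if mcount ≥ 2 || (mcount == 1 && keywords.any (fun kw => PySem.Chars.isIn kw.toList titleL)) then 1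
      else 0
  if level > acc.2 then (some p.1, level) else acc

def extract_cuisine_py_alt (text : String) (title : String) (ingredients : List String) : Option String :=
  let titleL := PySem.Chars.lower title.toList
  let combined := titleL ++ ' ' :: PySem.Chars.lower text.toList
  (cuisineTable.foldl (ecStepB titleL combined) (none, 0)).1

-- ===== PRECONDITION & SPEC =====
def Spec_extract_cuisine_py (text : String) (title : String) (ingredients : List String) (out : Option String) : Prop := out = extract_cuisine_py_alt text title ingredients
instance (text : String) (title : String) (ingredients : List String) (out : Option String) : Decidable (Spec_extract_cuisine_py text title ingredients out) := by unfold Spec_extract_cuisine_py; infer_instance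

-- ===== CLAIM (what is proved, stated in full; the proofs are below) =====
def Claim_equal_extract_cuisine_py : Prop := ∀ (text : String) (title : String) (ingredients : List String), Dom_extract_cuisine_py text title ingredients → Spec_extract_cuisine_py text title ingredients (extract_cuisine_py text title ingredients)

-- ===== LEMMAS AND PROOFS =====

-- Proof-side view of B's loop body on an already-parsed (cuisine, keyword-list) pair
def ecLevel (titleL combined : List Char) (p : String × List String) : Nat :=
  if PySem.Chars.isIn (PySem.Chars.lower p.1.toList) titleL then 2
  else
    let mcount := p.2.countP (fun kw => PySem.Chars.isIn kw.toList combined)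
    if mcount ≥ 2 || (mcount == 1 && p.2.any (fun kw => PySem.Chars.isIn kw.toList titleL)) then 1
    else 0

def ecStep (titleL combined : List Char) (acc : Option String × Nat) (p : String × List String) : Option String × Nat :=
  if ecLevel titleL combined p > acc.2 then (some p.1, ecLevel titleL combined p) else acc

-- csv parse of one table row
def ecParse (p : String × String) : String × List String :=
  (p.1, (PySem.Chars.splitOn p.2.toList [',']).map String.ofList)

theorem ecStepB_eq (tL cb : List Char) (acc : Option String × Nat) (p : String × String) :
    ecStepB tL cb acc p = ecStep tL cb acc (ecParse p) := rfl

-- The compact table parses to exactly A's dict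
set_option maxRecDepth 40000 in
set_option maxHeartbeats 2000000 in
theorem cuisineTable_parse : cuisineTable.map ecParse = cuisineKeywords := by decide

theorem ecLevel_le_two (tL cb : List Char) (p : String × List String) : ecLevel tL cb p ≤ 2 := by
  unfold ecLevel
  split_ifs <;> first | omega | (dsimp only; split_ifs <;> omega)

theorem ecLevel_of_title (tL cb : List Char) (c : String) (kws : List String)
    (h2 : PySem.Chars.isIn (PySem.Chars.lower c.toList) tL = true) :
    ecLevel tL cb (c, kws) = 2 := by
  unfold ecLevel; rw [if_pos h2]

theorem ecLevel_of_kw (tL cb : List Char) (c : String) (kws : List String)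
    (h2 : ¬ PySem.Chars.isIn (PySem.Chars.lower c.toList) tL = true)
    (h1 : (decide (kws.countP (fun kw => PySem.Chars.isIn kw.toList cb) ≥ 2)
           || (kws.countP (fun kw => PySem.Chars.isIn kw.toList cb) == 1
               && kws.any (fun kw => PySem.Chars.isIn kw.toList tL))) = true) :
    ecLevel tL cb (c, kws) = 1 := by
  unfold ecLevel; rw [if_neg h2]
  exact if_pos h1

theorem ecLevel_of_none (tL cb : List Char) (c : String) (kws : List String)
    (h2 : ¬ PySem.Chars.isIn (PySem.Chars.lower c.toList) tL = true)
    (h1 : ¬ (decide (kws.countP (fun kw => PySem.Chars.isIn kw.toList cb) ≥ 2)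
           || (kws.countP (fun kw => PySem.Chars.isIn kw.toList cb) == 1
               && kws.any (fun kw => PySem.Chars.isIn kw.toList tL))) = true) :
    ecLevel tL cb (c, kws) = 0 := by
  unfold ecLevel; rw [if_neg h2]
  exact if_neg h1

-- Once the best level is 2, the fold never updates (no level exceeds 2).
theorem ec_fold_two (tL cb : List Char) (L : List (String × List String)) (b : Option String) :
    L.foldl (ecStep tL cb) (b, 2) = (b, 2) := by
  induction L with
  | nil => rfl
  | cons p rest ih =>
    have h := ecLevel_le_two tL cb p
    rw [List.foldl_cons, ecStep, if_neg (by omega)]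
    exact ih

-- From best level 1 only a level-2 cuisine updates: the result is the first priority-1 hit, else b.
theorem ec_fold_one (tL cb : List Char) (L : List (String × List String)) (b : Option String) :
    (L.foldl (ecStep tL cb) (b, 1)).1 =
      (match ecLoop1 tL L with | some c => some c | none => b) := by
  induction L generalizing b with
  | nil => rfl
  | cons p rest ih =>
    obtain ⟨c, kws⟩ := p
    rw [List.foldl_cons, ecStep]
    by_cases h2 : PySem.Chars.isIn (PySem.Chars.lower c.toList) tL
    · rw [ecLevel_of_title tL cb c kws h2, if_pos (by omega), ec_fold_two]
      simp [ecLoop1, h2]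
    · have hle : ecLevel tL cb (c, kws) ≤ 1 := by
        by_cases h : (decide (kws.countP (fun kw => PySem.Chars.isIn kw.toList cb) ≥ 2)
           || (kws.countP (fun kw => PySem.Chars.isIn kw.toList cb) == 1
               && kws.any (fun kw => PySem.Chars.isIn kw.toList tL))) = true
        · rw [ecLevel_of_kw tL cb c kws h2 h]
        · rw [ecLevel_of_none tL cb c kws h2 h]; omega
      rw [if_neg (by omega), ih]
      simp [ecLoop1, h2]

-- Main invariant: A's two sequential scans equal the score-then-select fold from the empty state.
theorem ec_main (tL cb : List Char) (L : List (String × List String)) :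
    (match ecLoop1 tL L with | some c => some c | none => ecLoop2 tL cb L) =
      (L.foldl (ecStep tL cb) (none, 0)).1 := by
  induction L with
  | nil => rfl
  | cons p rest ih =>
    obtain ⟨c, kws⟩ := p
    rw [List.foldl_cons, ecStep]
    by_cases h2 : PySem.Chars.isIn (PySem.Chars.lower c.toList) tL
    · rw [ecLevel_of_title tL cb c kws h2, if_pos (by omega), ec_fold_two]
      simp [ecLoop1, h2]
    · by_cases hor : (decide (kws.countP (fun kw => PySem.Chars.isIn kw.toList cb) ≥ 2)
           || (kws.countP (fun kw => PySem.Chars.isIn kw.toList cb) == 1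
               && kws.any (fun kw => PySem.Chars.isIn kw.toList tL))) = true
      · rw [ecLevel_of_kw tL cb c kws h2 hor, if_pos (by omega), ec_fold_one]
        rcases Bool.or_eq_true_iff.mp hor with hm2 | hm1
        · simp [ecLoop1, ecLoop2, h2, of_decide_eq_true hm2]
        · rcases Bool.and_eq_true_iff.mp hm1 with ⟨hc1, hany⟩
          have hm : kws.countP (fun kw => PySem.Chars.isIn kw.toList cb) = 1 := by
            simpa using hc1
          simp only [ecLoop1, ecLoop2, h2, Bool.false_eq_true, if_false]
          rw [if_neg (show ¬ kws.countP (fun kw => PySem.Chars.isIn kw.toList cb) ≥ 2 by omega),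
            if_pos hm1]
      · rw [ecLevel_of_none tL cb c kws h2 hor, if_neg (by omega)]
        have hnor := hor
        rw [Bool.or_eq_true_iff] at hnor
        push Not at hnor
        obtain ⟨hd, hb⟩ := hnor
        have hmlt : ¬ kws.countP (fun kw => PySem.Chars.isIn kw.toList cb) ≥ 2 := by
          simpa using hd
        simp only [ecLoop1, ecLoop2, h2, Bool.false_eq_true, if_false]
        rw [if_neg hmlt, if_neg hb]
        exact ih

-- B's fold over the compact table = the fold over the parsed table
theorem ec_foldB (tL cb : List Char) :
    cuisineTable.foldl (ecStepB tL cb) (none, 0) =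
      cuisineKeywords.foldl (ecStep tL cb) (none, 0) := by
  have hf : ecStepB tL cb = fun acc p => ecStep tL cb acc (ecParse p) := by
    funext acc p; exact ecStepB_eq tL cb acc p
  rw [hf, ← List.foldl_map, cuisineTable_parse]

-- ===== VERDICT (by name: the statement is the Claim_ definition above) =====
theorem extract_cuisine_py_spec : Claim_equal_extract_cuisine_py := by
  intro text title ingredients _
  unfold Spec_extract_cuisine_py
  show extract_cuisine_py text title ingredients = extract_cuisine_py_alt text title ingredients
  simp only [extract_cuisine_py, extract_cuisine_py_alt]
  rw [ec_foldB]
  exact ec_main _ _ _
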